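-- pv_equiv track=rewrite | github.com/doogunwo/Computer-Science | python/영역구하기.py | solution
-- ===== SOURCE A (Python) =====
-- def solution(ing):
--     answer = 0
--     sum = []
--
--     for i in ing:
--         sum.append(i)
--         if sum[-4:] == [1,2,3,1]:
--             answer = answer +1
--             for _ in range(4):
--                 sum.pop()
--
--
--     return answer
-- ===== SOURCE B (Python) =====
-- def solution(ing):
--     # Count reductions by repeatedly deleting the LEFTMOST [1,2,3,1] window
--     # and rescanning: equivalent to A's streaming stack (return value only).
--     lst = list(ing)
--     answer = 0
--     found = True
--     while found:
--         found = False
--         for i in range(len(lst) - 3):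
--             if lst[i:i + 4] == [1, 2, 3, 1]:
--                 del lst[i:i + 4]
--                 answer += 1
--                 found = True
--                 break
--     return answer
-- ===== Notes on version B (the rewrite author's own statement) =====
-- stated objective: alternative
-- what changed: Replaces A's one-pass streaming stack (push each element, pop four when the suffix equals [1,2,3,1]) by repeated deletion of the leftmost [1,2,3,1] window from a copy of the list with a rescan from the start, counting deletions.
import Mathlib
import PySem

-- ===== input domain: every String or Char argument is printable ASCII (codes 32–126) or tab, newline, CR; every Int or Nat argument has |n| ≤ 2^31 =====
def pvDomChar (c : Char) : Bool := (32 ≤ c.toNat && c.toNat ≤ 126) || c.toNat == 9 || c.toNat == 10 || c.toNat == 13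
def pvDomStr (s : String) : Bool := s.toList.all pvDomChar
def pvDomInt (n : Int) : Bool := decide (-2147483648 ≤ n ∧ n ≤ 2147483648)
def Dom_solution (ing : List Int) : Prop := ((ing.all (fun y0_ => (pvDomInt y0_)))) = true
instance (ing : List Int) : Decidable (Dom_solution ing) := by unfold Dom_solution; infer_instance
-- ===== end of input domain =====

-- B replaces A's streaming stack by repeated deletion of the leftmost [1,2,3,1]
-- window with a rescan from the start (alternative decomposition, same result).

-- ===== PORT A =====
-- A's for-loop over the input, carrying the stack `sum` and the counter `answer`.
def aloop (st : List Int) (ans : Int) : List Int → Int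
  | [] => ans
  | i :: rest =>
    -- sum.append(i)
    let s := st ++ [i]
    -- if sum[-4:] == [1,2,3,1]
    if PySem.List.slice s (some (-4)) none = [1, 2, 3, 1] then
      -- four pops of the last element = keep all but the last four
      aloop (s.take (s.length - 4)) (ans + 1) rest
    else
      aloop s ans rest

def solution (ing : List Int) : Int := aloop [] 0 ing

-- ===== PORT B =====
-- Source B's inner for-loop: scan for the first index whose 4-window equals
-- [1,2,3,1]; `some l'` is the list with that window deleted, `none` = no match.
def delLeftmost? : List Int → Option (List Int)
  | a :: b :: c :: d :: rest =>
    if a = 1 ∧ b = 2 ∧ c = 3 ∧ d = 1 then some rest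
    else (delLeftmost? (b :: c :: d :: rest)).map (a :: ·)
  | _ => none

-- the port of B cites this for termination: each deletion removes 4 elements
theorem delLeftmost?_length : ∀ (l l' : List Int), delLeftmost? l = some l' → l'.length + 4 = l.length
  | a :: b :: c :: d :: rest, l', h => by
    by_cases hc : a = 1 ∧ b = 2 ∧ c = 3 ∧ d = 1
    · simp [delLeftmost?, hc] at h; simp [← h]
    · simp only [delLeftmost?, if_neg hc, Option.map_eq_some_iff] at h
      obtain ⟨m, hm, rfl⟩ := h
      have := delLeftmost?_length _ _ hm
      simp at this ⊢; omega
  | [], _, h => by simp [delLeftmost?] at h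
  | [_], _, h => by simp [delLeftmost?] at h
  | [_, _], _, h => by simp [delLeftmost?] at h
  | [_, _, _], _, h => by simp [delLeftmost?] at h

-- Source B's while-loop: delete leftmost windows until none is found
def bloop (l : List Int) (ans : Int) : Int :=
  match h : delLeftmost? l with
  | none => ans
  | some l' => bloop l' (ans + 1)
termination_by l.length
decreasing_by have := delLeftmost?_length _ _ h; omega

def solution_alt (ing : List Int) : Int := bloop ing 0

-- ===== PRECONDITION & SPEC =====
def Spec_solution (ing : List Int) (out : Int) : Prop := out = solution_alt ing
instance (ing : List Int) (out : Int) : Decidable (Spec_solution ing out) := by unfold Spec_solution; infer_instance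

-- ===== CLAIM (what is proved, stated in full; the proofs are below) =====
def Claim_equal_solution : Prop := ∀ (ing : List Int), Dom_solution ing → Spec_solution ing (solution ing)

-- ===== LEMMAS AND PROOFS =====

theorem bloop_none {l : List Int} {ans : Int} (h : delLeftmost? l = none) : bloop l ans = ans := by
  rw [bloop, h]

theorem bloop_some {l l' : List Int} {ans : Int} (h : delLeftmost? l = some l') :
    bloop l ans = bloop l' (ans + 1) := by
  rw [bloop, h]

theorem nopat_tail {a : Int} {l : List Int} (h : delLeftmost? (a :: l) = none) :
    delLeftmost? l = none := by
  rcases l with _ | ⟨b, _ | ⟨c, _ | ⟨d, rest⟩⟩⟩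
  · simp [delLeftmost?]
  · simp [delLeftmost?]
  · simp [delLeftmost?]
  · by_cases hc : a = 1 ∧ b = 2 ∧ c = 3 ∧ d = 1
    · simp [delLeftmost?, hc] at h
    · simpa [delLeftmost?, hc] using h

theorem nopat_prefix : ∀ {l l' : List Int}, delLeftmost? (l ++ l') = none → delLeftmost? l = none := by
  intro l
  induction l with
  | nil => intro l' _; simp [delLeftmost?]
  | cons a l1 ih =>
    intro l' h
    rcases l1 with _ | ⟨b, _ | ⟨c, _ | ⟨d, l4⟩⟩⟩
    · simp [delLeftmost?]
    · simp [delLeftmost?]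
    · simp [delLeftmost?]
    · by_cases hc : a = 1 ∧ b = 2 ∧ c = 3 ∧ d = 1
      · simp [delLeftmost?, hc] at h
      · simp only [List.cons_append, delLeftmost?, if_neg hc, Option.map_eq_none_iff] at h ⊢
        exact ih h

-- if the stack (ending in [1,2,3]) is match-free, the occurrence just completed
-- is the leftmost one in the whole remaining string
theorem stepSome : ∀ (t rest : List Int), delLeftmost? (t ++ [1, 2, 3]) = none →
    delLeftmost? (t ++ 1 :: 2 :: 3 :: 1 :: rest) = some (t ++ rest) := by
  intro t
  induction t with
  | nil => intro rest _; simp [delLeftmost?]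
  | cons a t1 ih =>
    intro rest h
    have h2 : delLeftmost? (t1 ++ [1, 2, 3]) = none := nopat_tail (by simpa using h)
    rcases t1 with _ | ⟨b, _ | ⟨c, _ | ⟨d, t4⟩⟩⟩
    · simp [delLeftmost?]
    · simp [delLeftmost?]
    · by_cases hc : a = 1 ∧ b = 2 ∧ c = 3
      · exfalso
        obtain ⟨rfl, rfl, rfl⟩ := hc
        simp [delLeftmost?] at h
      · simp [delLeftmost?, hc]
    · by_cases hc : a = 1 ∧ b = 2 ∧ c = 3 ∧ d = 1
      · exfalso
        simp [delLeftmost?, hc] at h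
      · have hi := ih rest h2
        simp only [List.cons_append] at hi ⊢
        simp only [delLeftmost?]
        rw [if_neg hc, hi]
        rfl

-- appending one element to a match-free stack whose new 4-suffix is not the
-- pattern keeps it match-free
theorem nopat_snoc : ∀ {s : List Int} {x : Int}, delLeftmost? s = none →
    (s ++ [x]).drop ((s ++ [x]).length - 4) ≠ [1, 2, 3, 1] →
    delLeftmost? (s ++ [x]) = none := by
  intro s
  induction s with
  | nil => intro x _ _; simp [delLeftmost?]
  | cons a s1 ih =>
    intro x h1 h2
    rcases s1 with _ | ⟨b, _ | ⟨c, _ | ⟨d, s4⟩⟩⟩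
    · simp [delLeftmost?]
    · simp [delLeftmost?]
    · have hc : ¬ (a = 1 ∧ b = 2 ∧ c = 3 ∧ x = 1) := by
        rintro ⟨rfl, rfl, rfl, rfl⟩; simp at h2
      simp [delLeftmost?, hc]
    · have hc : ¬ (a = 1 ∧ b = 2 ∧ c = 3 ∧ d = 1) := by
        intro hc; simp [delLeftmost?, hc] at h1
      have h1' : delLeftmost? (b :: c :: d :: s4) = none := nopat_tail h1
      have h2' : ((b :: c :: d :: s4) ++ [x]).drop (((b :: c :: d :: s4) ++ [x]).length - 4)
          ≠ [1, 2, 3, 1] := by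
        intro he; apply h2
        simp only [List.cons_append] at he ⊢
        have hlen : (a :: b :: c :: d :: (s4 ++ [x])).length - 4
            = ((b :: c :: d :: (s4 ++ [x])).length - 4) + 1 := by simp
        rw [hlen, List.drop_succ_cons]
        exact he
      simp only [List.cons_append, delLeftmost?, if_neg hc, Option.map_eq_none_iff] at h1' h2' ⊢
      exact ih h1' h2'

theorem main_loop : ∀ (xs st : List Int) (ans : Int), delLeftmost? st = none →
    aloop st ans xs = bloop (st ++ xs) ans := by
  intro xs
  induction xs with
  | nil => intro st ans h; simp [aloop, bloop_none h]
  | cons i rest ih =>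
    intro st ans h
    by_cases hm : PySem.List.slice (st ++ [i]) (some (-4)) none = [1, 2, 3, 1]
    · -- the 4-suffix of st ++ [i] is the pattern
      rw [PySem.List.slice_from_neg_ofNat _ 4 (by norm_num)] at hm
      set s := st ++ [i] with hs
      have hsl : s.length = st.length + 1 := by simp [hs]
      have hdec : s = s.take (s.length - 4) ++ [1, 2, 3, 1] := by
        conv_lhs => rw [← List.take_append_drop (s.length - 4) s]
        rw [hm]
      have hlen4 : 4 ≤ s.length := by
        have := congrArg List.length hdec
        simp at this; omega
      set T := s.take (s.length - 4) with hT
      have hst : st = T ++ [1, 2, 3] ∧ i = (1 : Int) := by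
        have he : st ++ [i] = (T ++ [1, 2, 3]) ++ [1] := by
          rw [← hs, hdec]; simp
        have hinj := List.append_inj' he (by simp)
        refine ⟨hinj.1, ?_⟩
        have := hinj.2; simpa using this
      obtain ⟨hst1, rfl⟩ := hst
      have hTnone : delLeftmost? T = none := nopat_prefix (l' := [1, 2, 3]) (hst1 ▸ h)
      have hbig : st ++ 1 :: rest = T ++ 1 :: 2 :: 3 :: 1 :: rest := by
        rw [hst1]; simp
      rw [aloop, if_pos (by rw [PySem.List.slice_from_neg_ofNat _ 4 (by norm_num)]; exact hm)]
      rw [hbig, bloop_some (stepSome T rest (hst1 ▸ h))]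
      exact ih T (ans + 1) hTnone
    · rw [aloop, if_neg hm]
      rw [PySem.List.slice_from_neg_ofNat _ 4 (by norm_num)] at hm
      have hnone : delLeftmost? (st ++ [i]) = none := nopat_snoc h hm
      have he : st ++ i :: rest = (st ++ [i]) ++ rest := by simp
      rw [he]
      exact ih (st ++ [i]) ans hnone

-- ===== VERDICT (by name: the statement is the Claim_ definition above) =====
theorem solution_spec : Claim_equal_solution := by
  intro ing _
  unfold Spec_solution solution solution_alt
  simpa using main_loop ing [] 0 (by simp [delLeftmost?])
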